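-- pv_equiv track=rewrite | github.com/ProntoNLP/pronto-nlp-sdk | pronto_nlp/ProntoAPI/SelectRelation_ExtraMetadata_JS.py | ConvertExtraMetadataRow
-- ===== SOURCE A (Python) =====
-- def ConvertExtraMetadataRow(row, headerIndex2ColumnIndex, fSkipFirstColumn):
--   convertedRow = []
--   for iH in range((1 if fSkipFirstColumn else 0), len(row)):
--     iC = headerIndex2ColumnIndex[iH]
--     if iC < 0: continue
--     while len(convertedRow) <= iC: convertedRow.append("")
--     convertedRow[iC] = row[iH]
--   return convertedRow
-- ===== SOURCE B (Python) =====
-- def ConvertExtraMetadataRow(row, headerIndex2ColumnIndex, fSkipFirstColumn):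
--     start = 1 if fSkipFirstColumn else 0
--     maxIC = -1
--     for iH in range(start, len(row)):
--         iC = headerIndex2ColumnIndex[iH]
--         if iC > maxIC:
--             maxIC = iC
--     convertedRow = [''] * (maxIC + 1)
--     for iH in range(start, len(row)):
--         iC = headerIndex2ColumnIndex[iH]
--         if iC >= 0:
--             convertedRow[iC] = row[iH]
--     return convertedRow
-- ===== Notes on version B (the rewrite author's own statement) =====
-- stated objective: alternative
-- what changed: Instead of growing the output list by repeated one-element appends inside the scatter loop, B first computes the maximum target column in one pass, allocates the full [''] * (maxIC+1) result once, and then scatters row cells into it in a second pass (later duplicates overwrite earlier ones just as in A).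
import Mathlib
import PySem

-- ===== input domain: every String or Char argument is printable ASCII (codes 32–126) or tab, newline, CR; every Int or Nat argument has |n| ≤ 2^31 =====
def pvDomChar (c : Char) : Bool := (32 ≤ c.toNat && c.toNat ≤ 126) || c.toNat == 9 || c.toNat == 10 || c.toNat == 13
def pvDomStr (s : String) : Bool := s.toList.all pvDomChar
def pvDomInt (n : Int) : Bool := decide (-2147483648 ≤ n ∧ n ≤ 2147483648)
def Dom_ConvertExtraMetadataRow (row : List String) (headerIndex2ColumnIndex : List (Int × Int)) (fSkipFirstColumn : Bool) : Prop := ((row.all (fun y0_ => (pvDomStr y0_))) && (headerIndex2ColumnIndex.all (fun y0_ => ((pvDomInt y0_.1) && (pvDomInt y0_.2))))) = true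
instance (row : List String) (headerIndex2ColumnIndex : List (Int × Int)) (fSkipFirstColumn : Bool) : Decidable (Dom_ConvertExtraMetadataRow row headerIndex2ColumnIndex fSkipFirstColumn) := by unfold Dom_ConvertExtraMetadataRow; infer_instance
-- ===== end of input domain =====

-- B replaces A's grow-by-append scatter with a max pass plus a single preallocated [''] * (maxIC+1)
-- buffer filled in a second scatter pass (alternative decomposition; return values proved equal).

-- shared lookup: headerIndex2ColumnIndex[iH] on the dict, with default -1 where Python raises
-- KeyError (those inputs are excluded by Pre_ below)
def pvLook (hm : List (Int × Int)) (k : Int) : Int :=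
  PySem.Dict.getD (PySem.Dict.mk hm) k (-1)

-- ===== PORT A =====
-- the 'while len(convertedRow) <= iC: convertedRow.append("")' loop
def CERpad (l : List String) (iC : Nat) : List String :=
  if _h : l.length ≤ iC then CERpad (l ++ [""]) iC else l
  termination_by iC + 1 - l.length
  decreasing_by simp [List.length_append]; omega

def ConvertExtraMetadataRow (row : List String) (headerIndex2ColumnIndex : List (Int × Int)) (fSkipFirstColumn : Bool) : List String :=
  (PySem.List.pyRange (if fSkipFirstColumn then 1 else 0) row.length 1).foldl
    (fun convertedRow iH =>
      let iC := pvLook headerIndex2ColumnIndex iH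
      if iC < 0 then convertedRow
      else PySem.List.pySetD (CERpad convertedRow iC.toNat) iC (PySem.List.pyGetD row iH ""))
    []

-- ===== PORT B =====
def ConvertExtraMetadataRow_alt (row : List String) (headerIndex2ColumnIndex : List (Int × Int)) (fSkipFirstColumn : Bool) : List String :=
  let start : Int := if fSkipFirstColumn then 1 else 0
  let idxs := PySem.List.pyRange start row.length 1
  let maxIC : Int := idxs.foldl
    (fun maxIC iH =>
      let iC := pvLook headerIndex2ColumnIndex iH
      if iC > maxIC then iC else maxIC) (-1)
  idxs.foldl
    (fun convertedRow iH =>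
      let iC := pvLook headerIndex2ColumnIndex iH
      if iC ≥ 0 then PySem.List.pySetD convertedRow iC (PySem.List.pyGetD row iH "")
      else convertedRow)
    (List.replicate (maxIC + 1).toNat "")

-- ===== PRECONDITION & SPEC =====
-- Pre_ excludes exactly the inputs on which Python's headerIndex2ColumnIndex[iH] raises KeyError
-- (some looped-over header index is missing from the dict); both Pythons raise there.
def Pre_ConvertExtraMetadataRow (row : List String) (headerIndex2ColumnIndex : List (Int × Int)) (fSkipFirstColumn : Bool) : Prop :=
  ∀ iH ∈ PySem.List.pyRange (if fSkipFirstColumn then 1 else 0) row.length 1,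
    (PySem.Dict.get? (PySem.Dict.mk headerIndex2ColumnIndex) iH).isSome = true
instance (row : List String) (headerIndex2ColumnIndex : List (Int × Int)) (fSkipFirstColumn : Bool) : Decidable (Pre_ConvertExtraMetadataRow row headerIndex2ColumnIndex fSkipFirstColumn) := by unfold Pre_ConvertExtraMetadataRow; infer_instance

def pvWitness_ConvertExtraMetadataRow : List String × (List (Int × Int)) × Bool :=
  (["a", "b c"], [(0, 2), (1, 0)], false)

def Spec_ConvertExtraMetadataRow (row : List String) (headerIndex2ColumnIndex : List (Int × Int)) (fSkipFirstColumn : Bool) (out : List String) : Prop := out = ConvertExtraMetadataRow_alt row headerIndex2ColumnIndex fSkipFirstColumn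
instance (row : List String) (headerIndex2ColumnIndex : List (Int × Int)) (fSkipFirstColumn : Bool) (out : List String) : Decidable (Spec_ConvertExtraMetadataRow row headerIndex2ColumnIndex fSkipFirstColumn out) := by unfold Spec_ConvertExtraMetadataRow; infer_instance

-- ===== CLAIM (what is proved, stated in full; the proofs are below) =====
def Claim_equal_ConvertExtraMetadataRow : Prop := ∀ (row : List String) (headerIndex2ColumnIndex : List (Int × Int)) (fSkipFirstColumn : Bool), Dom_ConvertExtraMetadataRow row headerIndex2ColumnIndex fSkipFirstColumn → Pre_ConvertExtraMetadataRow row headerIndex2ColumnIndex fSkipFirstColumn → Spec_ConvertExtraMetadataRow row headerIndex2ColumnIndex fSkipFirstColumn (ConvertExtraMetadataRow row headerIndex2ColumnIndex fSkipFirstColumn)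

-- ===== LEMMAS AND PROOFS =====

-- proof-local names for the two loop bodies and the max accumulator
def stA (hm : List (Int × Int)) (row : List String) (conv : List String) (iH : Int) : List String :=
  if pvLook hm iH < 0 then conv
  else PySem.List.pySetD (CERpad conv (pvLook hm iH).toNat) (pvLook hm iH) (PySem.List.pyGetD row iH "")

def stB (hm : List (Int × Int)) (row : List String) (conv : List String) (iH : Int) : List String :=
  if pvLook hm iH ≥ 0 then PySem.List.pySetD conv (pvLook hm iH) (PySem.List.pyGetD row iH "") else conv

def mxf (hm : List (Int × Int)) (m : Int) (iH : Int) : Int :=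
  if pvLook hm iH > m then pvLook hm iH else m

lemma CERpad_eq (l : List String) (n : Nat) :
    CERpad l n = l ++ List.replicate (n + 1 - l.length) "" := by
  fun_induction CERpad l n with
  | case1 l h ih =>
      rw [ih, List.append_assoc, List.singleton_append, ← List.replicate_succ]
      have h2 : n + 1 - (l ++ [""]).length + 1 = n + 1 - l.length := by
        simp only [List.length_append, List.length_singleton]; omega
      rw [h2]
  | case2 l h =>
      have : n + 1 - l.length = 0 := by omega
      simp [this]

lemma mxf_eq_max (hm : List (Int × Int)) (m iH : Int) :
    mxf hm m iH = max m (pvLook hm iH) := by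
  simp only [mxf]
  omega

lemma mxfold_eq (hm : List (Int × Int)) (L : List Int) (init : Int) :
    L.foldl (mxf hm) init = L.foldl (fun acc y => max acc (pvLook hm y)) init := by
  exact PySem.List.foldl_congr_mem L _ _ init (fun acc _ _ => mxf_eq_max hm _ _)

lemma neg_one_le_mxfold (hm : List (Int × Int)) (L : List Int) :
    -1 ≤ L.foldl (mxf hm) (-1) := by
  rw [mxfold_eq]
  exact (PySem.List.le_foldl_max_int L (pvLook hm) (-1)).1

lemma mxfold_bound (hm : List (Int × Int)) (L : List Int) (x : Int) (hx : x ∈ L) :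
    pvLook hm x ≤ L.foldl (mxf hm) (-1) := by
  rw [mxfold_eq]
  exact (PySem.List.le_foldl_max_int L (pvLook hm) (-1)).2 x hx

lemma lenA_gen (hm : List (Int × Int)) (row : List String) (L : List Int)
    (conv : List String) (m : Int) (hlen : conv.length = (m + 1).toNat) (hm1 : -1 ≤ m) :
    (L.foldl (stA hm row) conv).length = ((L.foldl (mxf hm) m) + 1).toNat := by
  induction L generalizing conv m with
  | nil => simpa using hlen
  | cons x L ih =>
      simp only [List.foldl_cons]
      by_cases hc : pvLook hm x < 0
      · have h1 : stA hm row conv x = conv := by simp [stA, hc]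
        have h2 : mxf hm m x = m := by simp only [mxf]; omega
        rw [h1, h2]; exact ih conv m hlen hm1
      · rw [not_lt] at hc
        have h1 : stA hm row conv x
            = (CERpad conv (pvLook hm x).toNat).set (pvLook hm x).toNat
                (PySem.List.pyGetD row x "") := by
          simp [stA, PySem.List.pySetD_of_nonneg _ _ hc, not_lt.mpr hc]
        have h2 : (stA hm row conv x).length = ((mxf hm m x) + 1).toNat := by
          rw [h1, List.length_set, CERpad_eq]
          simp only [List.length_append, List.length_replicate, mxf]
          omega
        exact (ih _ (mxf hm m x) h2 (by simp only [mxf]; omega))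

lemma lenA (hm : List (Int × Int)) (row : List String) (L : List Int) :
    (L.foldl (stA hm row) []).length = ((L.foldl (mxf hm) (-1)) + 1).toNat := by
  exact lenA_gen hm row L [] (-1) (by simp) le_rfl

lemma scatter_ext (hm : List (Int × Int)) (row : List String) (L : List Int)
    (base ext : List String)
    (hb : ∀ x ∈ L, 0 ≤ pvLook hm x → (pvLook hm x).toNat < base.length) :
    L.foldl (stB hm row) (base ++ ext) = L.foldl (stB hm row) base ++ ext := by
  induction L generalizing base with
  | nil => rfl
  | cons x L ih =>
      simp only [List.foldl_cons]
      by_cases hc : 0 ≤ pvLook hm x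
      · have hlt := hb x (List.mem_cons_self) hc
        have h1 : stB hm row (base ++ ext) x
            = base.set (pvLook hm x).toNat (PySem.List.pyGetD row x "") ++ ext := by
          simp only [stB, hc, if_pos, PySem.List.pySetD_of_nonneg _ _ hc]
          exact List.set_append_left _ _ hlt
        have h2 : stB hm row base x
            = base.set (pvLook hm x).toNat (PySem.List.pyGetD row x "") := by
          simp [stB, hc, PySem.List.pySetD_of_nonneg _ _ hc]
        rw [h1, h2]
        exact ih _ (fun y hy hy0 => by
          simpa [List.length_set] using hb y (List.mem_cons_of_mem _ hy) hy0)
      · have h1 : stB hm row (base ++ ext) x = base ++ ext := by simp [stB, hc]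
        have h2 : stB hm row base x = base := by simp [stB, hc]
        rw [h1, h2]
        exact ih _ (fun y hy hy0 => hb y (List.mem_cons_of_mem _ hy) hy0)

lemma main_fold_named (hm : List (Int × Int)) (row : List String) (L : List Int) :
    L.foldl (stA hm row) []
    = L.foldl (stB hm row)
        (List.replicate ((L.foldl (mxf hm) (-1)) + 1).toNat "") := by
  induction L using List.reverseRecOn with
  | nil => rfl
  | append_singleton L x ih =>
      simp only [List.foldl_append, List.foldl_cons, List.foldl_nil]
      set mL := L.foldl (mxf hm) (-1) with hmL
      have hge : -1 ≤ mL := neg_one_le_mxfold hm L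
      set kL : Nat := (mL + 1).toNat with hkL
      set k : Nat := ((mxf hm mL x) + 1).toNat with hk
      have hkk : kL ≤ k := by have hmx := mxf_eq_max hm mL x; omega
      have hsplit : List.replicate k ("" : String)
          = List.replicate kL "" ++ List.replicate (k - kL) "" := by
        rw [← List.replicate_add]; congr 1; omega
      have hbnd : ∀ y ∈ L, 0 ≤ pvLook hm y → (pvLook hm y).toNat
          < (List.replicate kL ("" : String)).length := by
        intro y hy hy0
        have := mxfold_bound hm L y hy
        simp only [List.length_replicate, hkL]
        omega
      rw [hsplit, scatter_ext hm row L _ _ hbnd, ← ih]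
      set AL := L.foldl (stA hm row) [] with hAL
      have hlen : AL.length = kL := lenA hm row L
      by_cases hc : 0 ≤ pvLook hm x
      · have hA : stA hm row AL x
            = (AL ++ List.replicate ((pvLook hm x).toNat + 1 - AL.length) "").set
                (pvLook hm x).toNat (PySem.List.pyGetD row x "") := by
          simp [stA, not_lt.mpr hc, PySem.List.pySetD_of_nonneg _ _ hc, CERpad_eq]
        have hB : stB hm row (AL ++ List.replicate (k - kL) "") x
            = (AL ++ List.replicate (k - kL) "").set
                (pvLook hm x).toNat (PySem.List.pyGetD row x "") := by
          simp [stB, hc, PySem.List.pySetD_of_nonneg _ _ hc]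
        rw [hA, hB, hlen]
        have hmx := mxf_eq_max hm mL x
        have harg : (pvLook hm x).toNat + 1 - kL = k - kL := by omega
        rw [harg]
      · have hA : stA hm row AL x = AL := by
          simp [stA, not_le.mp hc]
        have hkeq : k = kL := by have hmx := mxf_eq_max hm mL x; rw [not_le] at hc; omega
        have hB : stB hm row (AL ++ List.replicate (k - kL) "") x
            = AL ++ List.replicate (k - kL) "" := by
          simp [stB, hc]
        rw [hA, hB, hkeq]
        simp



-- ===== VERDICT (by name: the statement is the Claim_ definition above) =====
theorem ConvertExtraMetadataRow_spec : Claim_equal_ConvertExtraMetadataRow := by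
  intro row hm sk _ _
  unfold Spec_ConvertExtraMetadataRow ConvertExtraMetadataRow ConvertExtraMetadataRow_alt
  exact main_fold_named hm row _
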